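-- pv_equiv track=rewrite | github.com/GRitger/school | inforamatic/30.04.2025/Home/1.py | f
-- ===== SOURCE A (Python) =====
-- def f(x):
--     a = []
--     d = 2
--     while d * d <= x:
--         if x % d ==0:
--             a.append(d)
--             a.append(x//d)
--         d += 1
--     a.sort()
--     return a
-- ===== SOURCE B (Python) =====
-- def f(x):
--     if x < 4:
--         return []
--     n = x
--     primes = []
--     p = 2
--     while p * p <= n:
--         while n % p == 0:
--             primes.append(p)
--             n //= p
--         p += 1
--     if n > 1:
--         primes.append(n)
--     divisors = {1}
--     for q in primes:
--         divisors |= {d * q for d in divisors}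
--     return sorted(d for d in divisors if d != 1 and d != x)
-- ===== Notes on version B (the rewrite author's own statement) =====
-- stated objective: alternative
-- what changed: Instead of scanning every trial divisor up to sqrt(x) and sorting the collected pairs, B factorizes x into its prime list (dividing each found factor out), generates the full divisor set by multiplying the set by each prime in turn, and returns the sorted set minus 1 and x.
-- intended difference: On perfect squares x >= 4, A appends both d and x//d even when they are equal and so lists the square root twice (f(16)=[2,4,4,8]); B lists each proper divisor once ([2,4,8]), which is the intended divisor list. — e.g. on f(16): A returns [2, 4, 4, 8], B returns [2, 4, 8]
import Mathlib
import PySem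

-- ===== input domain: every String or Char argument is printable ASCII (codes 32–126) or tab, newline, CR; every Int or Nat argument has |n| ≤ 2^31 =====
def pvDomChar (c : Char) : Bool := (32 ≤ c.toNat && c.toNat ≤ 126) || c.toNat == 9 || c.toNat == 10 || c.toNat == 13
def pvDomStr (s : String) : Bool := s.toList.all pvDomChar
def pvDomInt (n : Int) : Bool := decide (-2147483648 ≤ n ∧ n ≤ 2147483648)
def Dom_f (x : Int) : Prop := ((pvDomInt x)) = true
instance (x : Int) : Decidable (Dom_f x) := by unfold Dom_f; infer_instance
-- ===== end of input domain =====

-- B factorizes x into primes and generates the divisor set from the factorization instead of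
-- scanning all trial divisors and sorting the collected pairs; on perfect squares A duplicates
-- the square root and B intentionally lists it once (see D_f below).

-- termination facts for the ports (cited by name in their decreasing_by proofs)
theorem le_mul_self_int (d : Int) : d ≤ d * d := by
  nlinarith [mul_self_nonneg d, mul_self_nonneg (d-1)]

-- ===== PORT A =====
-- while d*d <= x: if x % d == 0: a.append(d); a.append(x//d); d += 1
def fLoopA (x d : Int) (a : List Int) : List Int :=
  if d * d ≤ x then
    fLoopA x (d + 1)
      (if PySem.Int.mod x d = 0 then a ++ [d, PySem.Int.floordiv x d] else a)
  else a
termination_by (x + 1 - d).toNat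
decreasing_by
  have hd := le_mul_self_int d
  omega

def f (x : Int) : List Int :=
  PySem.List.sorted (fLoopA x 2 []) (fun y => y) false

-- ===== PORT B =====
theorem fd_bounds {p n : Int} (h1 : 0 < n) (h2 : 2 ≤ p) :
    0 ≤ PySem.Int.floordiv n p ∧ PySem.Int.floordiv n p < n := by
  constructor
  · rw [PySem.Int.le_floordiv_iff_mul_le (by omega)]
    omega
  · rw [PySem.Int.floordiv_lt_iff_lt_mul (by omega)]
    nlinarith

-- while n % p == 0: primes.append(p); n //= p   (the '0 < n ∧ 2 ≤ p' part of the guard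
-- only makes the recursion total; it holds on every state the algorithm reaches)
def innerLoopB (p n : Int) (primes : List Int) : Int × List Int :=
  if h : 0 < n ∧ 2 ≤ p ∧ PySem.Int.mod n p = 0 then
    innerLoopB p (PySem.Int.floordiv n p) (primes ++ [p])
  else (n, primes)
termination_by n.toNat
decreasing_by
  obtain ⟨h1, h2, -⟩ := h
  obtain ⟨hge, hlt⟩ := fd_bounds h1 h2
  omega

-- cited by outerLoopB's termination proof
theorem innerLoopB_fst_le (p n : Int) (ps : List Int) : (innerLoopB p n ps).1 ≤ n := by
  induction n, ps using innerLoopB.induct p with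
  | case1 n ps h ih =>
      rw [innerLoopB, dif_pos h]
      obtain ⟨h1, h2, -⟩ := h
      obtain ⟨hge, hlt⟩ := fd_bounds h1 h2
      omega
  | case2 n ps h =>
      rw [innerLoopB, dif_neg h]

-- while p*p <= n: (inner loop); p += 1
def outerLoopB (p n : Int) (primes : List Int) : Int × List Int :=
  if p * p ≤ n then
    outerLoopB (p + 1) (innerLoopB p n primes).1 (innerLoopB p n primes).2
  else (n, primes)
termination_by (n + 1 - p).toNat
decreasing_by
  have hp := le_mul_self_int p
  have := innerLoopB_fst_le p n primes
  omega

def f_alt (x : Int) : List Int :=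
  if x < 4 then []
  else
    let r := outerLoopB 2 x []
    let primes := if 1 < r.1 then r.2 ++ [r.1] else r.2
    let divisors :=
      primes.foldl (fun s q => PySem.Set.union s (s.map (fun d => d * q)))
        (PySem.Set.ofList [1])
    PySem.List.sorted (divisors.filter (fun d => decide (d ≠ 1) && decide (d ≠ x)))
      (fun y => y) false

-- ===== PRECONDITION & SPEC =====
-- On perfect squares x >= 4, A appends both d and x//d even when they are equal and so lists
-- the square root twice (f(16)=[2,4,4,8]); B lists each proper divisor once ([2,4,8]),
-- which is the intended divisor list.
def D_f (x : Int) : Prop := 4 ≤ x ∧ Int.sqrt x * Int.sqrt x = x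
instance (x : Int) : Decidable (D_f x) := by unfold D_f; infer_instance

def Spec_f (x : Int) (out : List Int) : Prop := ¬ D_f x → out = f_alt x
instance (x : Int) (out : List Int) : Decidable (Spec_f x out) := by unfold Spec_f; infer_instance

def pvDiffWitness_f : Int := 16
def pvDiffWitnessOut_f : (List Int) × (List Int) := ([2, 4, 4, 8], [2, 4, 8])

-- ===== CLAIM (what is proved, stated in full; the proofs are below) =====
def Claim_unchanged_f : Prop := ∀ (x : Int), Dom_f x → Spec_f x (f x)
def Claim_changed_f : Prop := Dom_f (pvDiffWitness_f) ∧ D_f (pvDiffWitness_f) ∧ f (pvDiffWitness_f) = pvDiffWitnessOut_f.1 ∧ f_alt (pvDiffWitness_f) = pvDiffWitnessOut_f.2 ∧ pvDiffWitnessOut_f.1 ≠ pvDiffWitnessOut_f.2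
def Claim_exact_f : Prop := ∀ (x : Int), Dom_f x → D_f x → f x ≠ f_alt x

-- ===== LEMMAS AND PROOFS =====

-- ---------- A-side characterisation ----------

-- the list of trial divisors ≥ d that divide x (with d*d ≤ x), in increasing order
def divs (x d : Int) : List Int :=
  if d * d ≤ x then
    if PySem.Int.mod x d = 0 then d :: divs x (d + 1) else divs x (d + 1)
  else []
termination_by (x + 1 - d).toNat
decreasing_by
  all_goals
    have hd := le_mul_self_int d
    omega

theorem fLoopA_eq (x d : Int) (a : List Int) :
    fLoopA x d a = a ++ (divs x d).flatMap (fun k => [k, PySem.Int.floordiv x k]) := by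
  induction d using divs.induct x generalizing a with
  | case1 d h h2 ih =>
      rw [fLoopA, divs]
      simp only [h, if_pos, h2]
      rw [ih]
      simp
  | case2 d h h2 ih =>
      rw [fLoopA, divs]
      simp only [h, if_pos, h2, if_false]
      rw [ih]
  | case3 d h =>
      rw [fLoopA, divs]
      simp [h]

theorem mem_divs_iff {x d : Int} (hd : 0 ≤ d) (e : Int) :
    e ∈ divs x d ↔ d ≤ e ∧ e * e ≤ x ∧ PySem.Int.mod x e = 0 := by
  induction d using divs.induct x with
  | case1 d h h2 ih =>
      rw [divs]
      simp only [h, if_pos, h2, List.mem_cons]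
      rw [ih (by omega)]
      constructor
      · rintro (rfl | ⟨h1, h2', h3⟩)
        · exact ⟨le_refl _, h, h2⟩
        · exact ⟨by omega, h2', h3⟩
      · rintro ⟨h1, h2', h3⟩
        by_cases he : e = d
        · exact Or.inl he
        · exact Or.inr ⟨by omega, h2', h3⟩
  | case2 d h h2 ih =>
      rw [divs]
      simp only [h, if_pos, h2, if_false]
      rw [ih (by omega)]
      constructor
      · rintro ⟨h1, h2', h3⟩; exact ⟨by omega, h2', h3⟩
      · rintro ⟨h1, h2', h3⟩
        refine ⟨?_, h2', h3⟩
        rcases eq_or_lt_of_le h1 with rfl | hlt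
        · exact absurd h3 h2
        · omega
  | case3 d h =>
      rw [divs]
      simp only [h, if_false, List.not_mem_nil, false_iff]
      rintro ⟨h1, h2', h3⟩
      have : d * d ≤ e * e := by nlinarith
      omega

theorem pairwise_divs (x : Int) : (divs x 2).Pairwise (· < ·) := by
  have gen : ∀ d : Int, 0 ≤ d → (divs x d).Pairwise (· < ·) := by
    intro d
    induction d using divs.induct x with
    | case1 d h h2 ih =>
        intro hd
        rw [divs]
        simp only [h, if_pos, h2]
        refine List.Pairwise.cons (fun k hk => ?_) (ih (by omega))
        have := (mem_divs_iff (by omega) k).mp hk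
        omega
    | case2 d h h2 ih =>
        intro hd
        rw [divs]
        simp only [h, if_pos, h2, if_false]
        exact ih (by omega)
    | case3 d h =>
        intro _
        rw [divs]; simp [h]
  exact gen 2 (by omega)

-- exact division: for a positive divisor, k * (x // k) = x
theorem fd_exact {x k : Int} (hk : 0 < k) (h : PySem.Int.mod x k = 0) :
    k * PySem.Int.floordiv x k = x := by
  rw [PySem.Int.floordiv_eq_ediv_of_pos hk]
  exact Int.mul_ediv_cancel' ((PySem.Int.mod_eq_zero_iff_dvd x k).mp h)

-- ¬ D_f for x ≥ 4 means x is not a perfect square at all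
theorem no_sqrt {x : Int} (hx : 4 ≤ x) (hns : ¬ D_f x) : ∀ s : Int, s * s ≠ x := by
  intro s hs
  apply hns
  refine ⟨hx, ?_⟩
  have : Int.sqrt x = s.natAbs := by rw [← hs, Int.sqrt_eq]
  rw [this, ← hs]
  exact_mod_cast Int.natAbs_mul_self

-- membership in A's collected multiset (as the two-list concatenation)
theorem mem_AB {x : Int} (hx : 4 ≤ x) (e : Int) :
    (e ∈ divs x 2 ++ (divs x 2).map (fun k => PySem.Int.floordiv x k)) ↔
      (2 ≤ e ∧ e < PySem.Int.floordiv x 2 + 1 ∧ PySem.Int.mod x e = 0) := by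
  have hhalf : ∀ y : Int, y ≤ PySem.Int.floordiv x 2 ↔ y * 2 ≤ x := fun y =>
    PySem.Int.le_floordiv_iff_mul_le (by omega)
  rw [List.mem_append, List.mem_map]
  constructor
  · rintro (he | ⟨k, hk, rfl⟩)
    · obtain ⟨h1, h2, h3⟩ := (mem_divs_iff (by omega) e).mp he
      refine ⟨h1, ?_, h3⟩
      have : e * 2 ≤ x := by nlinarith
      have := (hhalf e).mpr this
      omega
    · obtain ⟨h1, h2, h3⟩ := (mem_divs_iff (by omega) k).mp hk
      have hex : k * PySem.Int.floordiv x k = x := fd_exact (by omega) h3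
      have hke : k ≤ PySem.Int.floordiv x k := by
        rw [PySem.Int.le_floordiv_iff_mul_le (by omega : (0:Int) < k)]; exact h2
      refine ⟨by omega, ?_, ?_⟩
      · have : PySem.Int.floordiv x k * 2 ≤ x := by nlinarith
        have := (hhalf _).mpr this
        omega
      · rw [PySem.Int.mod_eq_zero_iff_dvd]
        exact ⟨k, by linarith [hex]⟩
  · rintro ⟨h1, h2, h3⟩
    have h2' : e * 2 ≤ x := (hhalf e).mp (by omega)
    by_cases hsq : e * e ≤ x
    · exact Or.inl ((mem_divs_iff (by omega) e).mpr ⟨h1, hsq, h3⟩)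
    · rw [not_le] at hsq
      set k := PySem.Int.floordiv x e with hkdef
      have hex : e * k = x := fd_exact (by omega) h3
      have hk2 : 2 ≤ k := by nlinarith
      have hke : k < e := by nlinarith
      have hkk : k * k ≤ x := by nlinarith
      have hmodk : PySem.Int.mod x k = 0 := by
        rw [PySem.Int.mod_eq_zero_iff_dvd]; exact ⟨e, by linarith [hex]⟩
      refine Or.inr ⟨k, (mem_divs_iff (by omega) k).mpr ⟨hk2, hkk, hmodk⟩, ?_⟩
      have hexk : k * PySem.Int.floordiv x k = x := fd_exact (by omega) hmodk
      have : k * PySem.Int.floordiv x k = k * e := by rw [hexk]; linarith [hex]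
      have := mul_left_cancel₀ (by omega : (k:Int) ≠ 0) this
      omega

theorem nodup_AB {x : Int} (hx : 4 ≤ x) (hns : ∀ s : Int, s * s ≠ x) :
    (divs x 2 ++ (divs x 2).map (fun k => PySem.Int.floordiv x k)).Nodup := by
  have hmem : ∀ k ∈ divs x 2, 2 ≤ k ∧ k * k ≤ x ∧ PySem.Int.mod x k = 0 :=
    fun k hk => (mem_divs_iff (by omega) k).mp hk
  rw [List.nodup_append]
  refine ⟨(pairwise_divs x).imp ne_of_lt, ?_, ?_⟩
  · refine List.Nodup.map_on ?_ ((pairwise_divs x).imp ne_of_lt)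
    intro k1 hk1 k2 hk2 heq
    obtain ⟨a1, b1, c1⟩ := hmem k1 hk1
    obtain ⟨a2, b2, c2⟩ := hmem k2 hk2
    have e1 : k1 * PySem.Int.floordiv x k1 = x := fd_exact (by omega) c1
    have e2 : k2 * PySem.Int.floordiv x k2 = x := fd_exact (by omega) c2
    have hq : 0 < PySem.Int.floordiv x k1 := by nlinarith
    have : k1 * PySem.Int.floordiv x k1 = k2 * PySem.Int.floordiv x k1 := by
      rw [e1, heq, e2]
    exact mul_right_cancel₀ (by omega) this
  · intro e he b hb hbe
    rw [List.mem_map] at hb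
    obtain ⟨k, hk, hbk⟩ := hb
    subst hbe
    obtain ⟨a1, b1, c1⟩ := hmem e he
    obtain ⟨a2, b2, c2⟩ := hmem k hk
    have hex : k * PySem.Int.floordiv x k = x := fd_exact (by omega) c2
    rw [hbk] at hex
    -- k * e = x with e*e ≤ x and k*k ≤ x forces e = k and x = e*e
    have h1 : e ≤ k := by nlinarith
    have h2 : k ≤ e := by nlinarith
    have : e = k := le_antisymm h1 h2
    exact hns e (by nlinarith)

theorem perm_flatMap (q : Int → Int) (L : List Int) :
    (L ++ L.map q).Perm (L.flatMap fun k => [k, q k]) := by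
  induction L with
  | nil => simp
  | cons k L ih =>
      simp only [List.flatMap_cons, List.map_cons, List.cons_append]
      exact ((List.perm_middle).trans (ih.cons _)).cons _

-- the A-side membership condition is exactly "proper divisor of x"
theorem divisor_cond {x e : Int} (hx : 4 ≤ x) :
    (2 ≤ e ∧ e < PySem.Int.floordiv x 2 + 1 ∧ PySem.Int.mod x e = 0) ↔
      (0 < e ∧ e ∣ x ∧ e ≠ 1 ∧ e ≠ x) := by
  have hhalf : ∀ y : Int, y ≤ PySem.Int.floordiv x 2 ↔ y * 2 ≤ x := fun y =>
    PySem.Int.le_floordiv_iff_mul_le (by omega)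
  constructor
  · rintro ⟨h1, h2, h3⟩
    have h2' : e * 2 ≤ x := (hhalf e).mp (by omega)
    exact ⟨by omega, (PySem.Int.mod_eq_zero_iff_dvd x e).mp h3, by omega, by omega⟩
  · rintro ⟨h1, h2, h3, h4⟩
    obtain ⟨k, hk⟩ := h2
    have hkpos : 0 < k := by nlinarith
    have hk1 : k ≠ 1 := by
      rintro rfl
      rw [mul_one] at hk
      exact h4 hk.symm
    have hk2 : 2 ≤ k := by omega
    have h2' : e * 2 ≤ x := by rw [hk]; nlinarith
    have := (hhalf e).mpr h2'
    exact ⟨by omega, by omega, (PySem.Int.mod_eq_zero_iff_dvd x e).mpr ⟨k, hk⟩⟩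

-- ---------- B-side characterisation ----------

theorem inner_spec (p n : Int) (ps : List Int) : 2 ≤ p → 0 < n →
    0 < (innerLoopB p n ps).1 ∧ (innerLoopB p n ps).1 ∣ n ∧
      (innerLoopB p n ps).1 * ((innerLoopB p n ps).2).prod = n * ps.prod ∧
      ¬ p ∣ (innerLoopB p n ps).1 ∧
      ∃ k : Nat, (innerLoopB p n ps).2 = ps ++ List.replicate k p := by
  induction n, ps using innerLoopB.induct p with
  | case1 n ps h ih =>
      intro hp hn
      obtain ⟨h1, h2, h3⟩ := h
      have hex : p * PySem.Int.floordiv n p = n := fd_exact (by omega) h3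
      have hfd : 0 < PySem.Int.floordiv n p := by nlinarith
      rw [innerLoopB, dif_pos ⟨h1, h2, h3⟩]
      obtain ⟨c1, c2, c3, c4, k, c5⟩ := ih hp hfd
      refine ⟨c1, dvd_trans c2 ⟨p, by linarith [hex]⟩, ?_, c4, ⟨k + 1, ?_⟩⟩
      · rw [c3, List.prod_append]
        simp only [List.prod_cons, List.prod_nil, mul_one]
        linear_combination ps.prod * hex
      · rw [c5, List.append_assoc]
        rfl
  | case2 n ps h =>
      intro hp hn
      rw [innerLoopB, dif_neg h]
      refine ⟨hn, dvd_refl n, rfl, ?_, ⟨0, by simp⟩⟩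
      intro hdvd
      exact h ⟨hn, hp, (PySem.Int.mod_eq_zero_iff_dvd n p).mpr hdvd⟩

-- a p ≥ 2 dividing n, where no q in [2, p) divides n, is prime
theorem mk_prime {p n : Int} (hp : 2 ≤ p) (hn : 0 < n) (hdvd : p ∣ n)
    (hfree : ∀ q : Int, 2 ≤ q → q < p → ¬ q ∣ n) : Prime p := by
  rw [Int.prime_iff_natAbs_prime, Nat.prime_def_lt]
  have hpa : (p.natAbs : Int) = p := Int.natAbs_of_nonneg (by omega)
  refine ⟨by omega, ?_⟩
  intro m hm hmd
  by_contra hm1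
  have hm0 : m ≠ 0 := by
    rintro rfl
    rw [Nat.zero_dvd] at hmd
    omega
  have hm2 : 2 ≤ m := by omega
  have hmZ : (m : Int) ∣ p := by
    have := Int.natCast_dvd_natCast.mpr hmd
    rwa [hpa] at this
  exact hfree (m : Int) (by exact_mod_cast hm2) (by omega) (dvd_trans hmZ hdvd)

-- the residual after removing all factors < p, with n < p*p, is prime (when ≥ 2)
theorem residual_prime {p n : Int} (hp : 2 ≤ p) (hn : 2 ≤ n) (hlt : n < p * p)
    (hfree : ∀ q : Int, 2 ≤ q → q < p → ¬ q ∣ n) : Prime n := by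
  rw [Int.prime_iff_natAbs_prime, Nat.prime_def_lt]
  have hna : (n.natAbs : Int) = n := Int.natAbs_of_nonneg (by omega)
  refine ⟨by omega, ?_⟩
  intro m hm hmd
  by_contra hm1
  have hm0 : m ≠ 0 := by
    rintro rfl
    rw [Nat.zero_dvd] at hmd
    omega
  have hm2 : (2 : Int) ≤ (m : Int) := by exact_mod_cast (by omega : 2 ≤ m)
  have hmn : (m : Int) < n := by omega
  have hmdZ : (m : Int) ∣ n := by
    have := Int.natCast_dvd_natCast.mpr hmd
    rwa [hna] at this
  obtain ⟨k, hk⟩ := hmdZ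
  have hkpos : 0 < k := by nlinarith
  have hk1 : k ≠ 1 := by
    rintro rfl
    rw [mul_one] at hk
    omega
  have hk2 : 2 ≤ k := by omega
  by_cases hmp : (m : Int) < p
  · exact hfree (m : Int) hm2 hmp ⟨k, hk⟩
  · rw [not_lt] at hmp
    have hkp : k < p := by nlinarith
    exact hfree k hk2 hkp ⟨(m : Int), by linarith [hk]⟩

theorem outer_spec (p n : Int) (ps : List Int) : 2 ≤ p → 0 < n →
    (∀ q : Int, 2 ≤ q → q < p → ¬ q ∣ n) →
    (∀ a ∈ ps, Prime a ∧ 2 ≤ a) →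
    0 < (outerLoopB p n ps).1 ∧
      (outerLoopB p n ps).1 * ((outerLoopB p n ps).2).prod = n * ps.prod ∧
      (∀ a ∈ (outerLoopB p n ps).2, Prime a ∧ 2 ≤ a) ∧
      ((outerLoopB p n ps).1 = 1 ∨ (Prime (outerLoopB p n ps).1 ∧ 2 ≤ (outerLoopB p n ps).1)) := by
  induction p, n, ps using outerLoopB.induct with
  | case1 p n ps h ih =>
      intro hp hn hfree hps
      rw [outerLoopB, if_pos h]
      by_cases hmod : PySem.Int.mod n p = 0
      · obtain ⟨i1, i2, i3, i4, k, i5⟩ := inner_spec p n ps hp hn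
        have hpprime : Prime p :=
          mk_prime hp hn ((PySem.Int.mod_eq_zero_iff_dvd n p).mp hmod) hfree
        have hfree' : ∀ q : Int, 2 ≤ q → q < p + 1 → ¬ q ∣ (innerLoopB p n ps).1 := by
          intro q hq1 hq2 hq3
          by_cases hqp : q = p
          · exact i4 (hqp ▸ hq3)
          · exact hfree q hq1 (by omega) (dvd_trans hq3 i2)
        have hps' : ∀ a ∈ (innerLoopB p n ps).2, Prime a ∧ 2 ≤ a := by
          intro a ha
          rw [i5, List.mem_append] at ha
          rcases ha with ha | ha
          · exact hps a ha
          · rw [List.mem_replicate] at ha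
            exact ha.2 ▸ ⟨hpprime, hp⟩
        obtain ⟨c1, c2, c3, c4⟩ := ih (by omega) i1 hfree' hps'
        exact ⟨c1, by rw [c2, i3], c3, c4⟩
      · have hrw : innerLoopB p n ps = (n, ps) := by
          rw [innerLoopB, dif_neg]
          rintro ⟨-, -, h3⟩
          exact hmod h3
        rw [hrw] at ih ⊢
        refine ih (by omega) hn ?_ hps
        intro q hq1 hq2 hq3
        by_cases hqp : q = p
        · subst hqp
          exact hmod ((PySem.Int.mod_eq_zero_iff_dvd n q).mpr hq3)
        · exact hfree q hq1 (by omega) hq3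
  | case2 p n ps h =>
      intro hp hn hfree hps
      rw [outerLoopB, if_neg h]
      rw [not_le] at h
      refine ⟨hn, rfl, hps, ?_⟩
      by_cases h1 : n = 1
      · exact Or.inl h1
      · exact Or.inr ⟨residual_prime hp (by omega) h hfree, by omega⟩

-- Euclid step: the positive divisors of m*q (q prime) are D ∪ q·D
theorem dvd_step {m q d : Int} (hq : Prime q) (hm : 0 < m) (hq2 : 2 ≤ q) :
    (0 < d ∧ d ∣ m * q) ↔ ((0 < d ∧ d ∣ m) ∨ ∃ a, (0 < a ∧ a ∣ m) ∧ d = a * q) := by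
  constructor
  · rintro ⟨hd, hdvd⟩
    by_cases hqd : q ∣ d
    · obtain ⟨a, ha⟩ := hqd
      refine Or.inr ⟨a, ⟨by nlinarith, ?_⟩, by rw [ha]; ring⟩
      have hqa : q * a ∣ q * m := by
        rw [← ha]
        obtain ⟨c, hc⟩ := hdvd
        exact dvd_trans ⟨c, hc⟩ (by rw [mul_comm])
      exact (mul_dvd_mul_iff_left (by omega : (q:Int) ≠ 0)).mp hqa
    · refine Or.inl ⟨hd, ?_⟩
      obtain ⟨c, hc⟩ := hdvd
      have hqd2 : q ∣ d * c := ⟨m, by rw [← hc]; ring⟩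
      rcases hq.dvd_mul.mp hqd2 with hcase | hcase
      · exact absurd hcase hqd
      · obtain ⟨c', hc'⟩ := hcase
        refine ⟨c', ?_⟩
        have heq : m * q = d * c' * q := by rw [hc, hc']; ring
        exact mul_right_cancel₀ (by omega : (q:Int) ≠ 0) heq
  · rintro (⟨hd, hdvd⟩ | ⟨a, ⟨ha, hadvd⟩, rfl⟩)
    · exact ⟨hd, dvd_trans hdvd ⟨q, rfl⟩⟩
    · exact ⟨by nlinarith, mul_dvd_mul hadvd (dvd_refl q)⟩

theorem fold_spec (P : List Int) (hP : ∀ a ∈ P, Prime a ∧ 2 ≤ a) :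
    ∀ (S : List Int) (m : Int), 0 < m → S.Nodup → (∀ d, d ∈ S ↔ 0 < d ∧ d ∣ m) →
    (P.foldl (fun s q => PySem.Set.union s (s.map (fun d => d * q))) S).Nodup ∧
      (∀ d, d ∈ P.foldl (fun s q => PySem.Set.union s (s.map (fun d => d * q))) S ↔
        0 < d ∧ d ∣ m * P.prod) := by
  induction P with
  | nil =>
      intro S m hm hnd hmem
      simp only [List.foldl_nil, List.prod_nil, mul_one]
      exact ⟨hnd, hmem⟩
  | cons q P ih =>
      intro S m hm hnd hmem
      obtain ⟨hqprime, hq2⟩ := hP q List.mem_cons_self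
      have hP' : ∀ a ∈ P, Prime a ∧ 2 ≤ a := fun a ha => hP a (List.mem_cons_of_mem _ ha)
      simp only [List.foldl_cons, List.prod_cons]
      have hnd' : (PySem.Set.union S (S.map (fun d => d * q))).Nodup :=
        PySem.Set.nodup_union _ _ hnd
      have hmem' : ∀ d, d ∈ PySem.Set.union S (S.map (fun d => d * q)) ↔
          0 < d ∧ d ∣ m * q := by
        intro d
        rw [PySem.Set.mem_union, dvd_step hqprime hm hq2]
        constructor
        · rintro (hmem1 | hmem1)
          · exact Or.inl ((hmem d).mp hmem1)
          · rw [List.mem_map] at hmem1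
            obtain ⟨a, ha, rfl⟩ := hmem1
            exact Or.inr ⟨a, (hmem a).mp ha, rfl⟩
        · rintro (hmem1 | ⟨a, ha, rfl⟩)
          · exact Or.inl ((hmem d).mpr hmem1)
          · exact Or.inr (List.mem_map.mpr ⟨a, (hmem a).mpr ha, rfl⟩)
      obtain ⟨c1, c2⟩ := ih hP' _ (m * q) (by nlinarith) hnd' hmem'
      refine ⟨c1, fun d => ?_⟩
      rw [c2 d, mul_assoc]

-- f_alt on x ≥ 4 is the sorted nodup list of proper divisors of x
theorem f_alt_char {x : Int} (hx : 4 ≤ x) :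
    ∃ F : List Int, f_alt x = PySem.List.sorted F (fun y => y) false ∧ F.Nodup ∧
      (∀ d, d ∈ F ↔ 0 < d ∧ d ∣ x ∧ d ≠ 1 ∧ d ≠ x) := by
  obtain ⟨o1, o2, o3, o4⟩ := outer_spec 2 x []
    (by omega) (by omega) (by intro q hq1 hq2 _; omega) (by intro a ha; simp at ha)
  rw [List.prod_nil, mul_one] at o2
  have hPprime : ∀ a ∈ (if 1 < (outerLoopB 2 x []).1
      then (outerLoopB 2 x []).2 ++ [(outerLoopB 2 x []).1] else (outerLoopB 2 x []).2),
      Prime a ∧ 2 ≤ a := by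
    split_ifs with h1
    · intro a ha
      rw [List.mem_append] at ha
      rcases ha with ha | ha
      · exact o3 a ha
      · rw [List.mem_singleton] at ha
        subst ha
        rcases o4 with h | h
        · omega
        · exact ⟨h.1, h.2⟩
    · exact o3
  have hPprod : (if 1 < (outerLoopB 2 x []).1
      then (outerLoopB 2 x []).2 ++ [(outerLoopB 2 x []).1] else (outerLoopB 2 x []).2).prod
      = x := by
    split_ifs with h1
    · rw [List.prod_append, List.prod_singleton, mul_comm]
      exact o2
    · have h1' : (outerLoopB 2 x []).1 = 1 := by
        rcases o4 with h | h
        · exact h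
        · omega
      rw [h1', one_mul] at o2
      exact o2
  obtain ⟨fn, fm⟩ := fold_spec _ hPprime (PySem.Set.ofList [1]) 1 one_pos
    (PySem.Set.nodup_ofList _)
    (by
      intro d
      rw [PySem.Set.mem_ofList, List.mem_singleton]
      constructor
      · rintro rfl; exact ⟨one_pos, one_dvd 1⟩
      · rintro ⟨hd, hdvd⟩
        rcases Int.isUnit_iff.mp (isUnit_of_dvd_one hdvd) with h | h <;> omega)
  refine ⟨(List.foldl (fun s q => PySem.Set.union s (s.map (fun d => d * q)))
      (PySem.Set.ofList [1])
      (if 1 < (outerLoopB 2 x []).1 then (outerLoopB 2 x []).2 ++ [(outerLoopB 2 x []).1]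
        else (outerLoopB 2 x []).2)).filter (fun d => decide (d ≠ 1) && decide (d ≠ x)),
    ?_, List.Nodup.filter _ fn, ?_⟩
  · unfold f_alt
    rw [if_neg (by omega : ¬ x < 4)]
  · intro d
    rw [List.mem_filter, fm d, one_mul, hPprod]
    simp only [Bool.and_eq_true, decide_eq_true_eq]
    tauto

-- ---------- assembling the claims ----------

theorem main_eq {x : Int} (hx : 4 ≤ x) (hns : ∀ s : Int, s * s ≠ x) : f x = f_alt x := by
  obtain ⟨F, hF, hFnd, hFmem⟩ := f_alt_char hx
  unfold f
  rw [hF, fLoopA_eq, List.nil_append, PySem.List.sorted_id_eq_sorted_id_iff_perm]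
  refine List.Perm.trans ((perm_flatMap _ _).symm) ?_
  rw [List.perm_ext_iff_of_nodup (nodup_AB hx hns) hFnd]
  intro e
  rw [mem_AB hx, hFmem, divisor_cond hx]

theorem small_eq {x : Int} (hx : x ≤ 3) : f x = f_alt x := by
  have hdiv : divs x 2 = [] := by rw [divs]; simp; omega
  unfold f f_alt
  rw [fLoopA_eq, hdiv, if_pos (by omega : x < 4)]
  simp [PySem.List.sorted]

-- for the tight claim: f has the square root at least twice
theorem count_f_ge {x s : Int} (hs : s * s = x) (hs2 : 2 ≤ s) :
    2 ≤ (f x).count s := by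
  have hmod : PySem.Int.mod x s = 0 := by
    rw [PySem.Int.mod_eq_zero_iff_dvd]; exact ⟨s, hs.symm⟩
  have hx : 4 ≤ x := by nlinarith
  have hmem : s ∈ divs x 2 := (mem_divs_iff (by omega) s).mpr ⟨hs2, by omega, hmod⟩
  have hfd : PySem.Int.floordiv x s = s := by
    have hh := fd_exact (by omega : (0:Int) < s) hmod
    have hss : s * PySem.Int.floordiv x s = s * s := by rw [hh, hs]
    exact mul_left_cancel₀ (by omega) hss
  have hperm : (f x).Perm (divs x 2 ++ (divs x 2).map (fun k => PySem.Int.floordiv x k)) := by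
    unfold f
    refine (PySem.List.sorted_perm _ _ _).trans ?_
    rw [fLoopA_eq, List.nil_append]
    exact ((perm_flatMap _ _).symm)
  rw [hperm.count_eq, List.count_append]
  have c1 : 1 ≤ (divs x 2).count s := List.one_le_count_iff.mpr hmem
  have c2 : 1 ≤ ((divs x 2).map (fun k => PySem.Int.floordiv x k)).count s := by
    refine List.one_le_count_iff.mpr ?_
    rw [List.mem_map]
    exact ⟨s, hmem, hfd⟩
  omega

theorem f_alt_nodup {x : Int} (hx : 4 ≤ x) : (f_alt x).Nodup := by
  obtain ⟨F, hF, hFnd, -⟩ := f_alt_char hx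
  rw [hF]
  exact ((PySem.List.sorted_perm _ _ _).nodup_iff).mpr hFnd

-- evaluation helpers for the witness input 16
theorem innerB_step {p n : Int} (ps : List Int) (h1 : 0 < n) (h2 : 2 ≤ p)
    (h3 : PySem.Int.mod n p = 0) :
    innerLoopB p n ps = innerLoopB p (PySem.Int.floordiv n p) (ps ++ [p]) := by
  rw [innerLoopB, dif_pos ⟨h1, h2, h3⟩]

theorem innerB_exit {p n : Int} (ps : List Int)
    (h : ¬ (0 < n ∧ 2 ≤ p ∧ PySem.Int.mod n p = 0)) : innerLoopB p n ps = (n, ps) := by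
  rw [innerLoopB, dif_neg h]

theorem outerB_step {p n : Int} (ps : List Int) (h : p * p ≤ n) :
    outerLoopB p n ps = outerLoopB (p + 1) (innerLoopB p n ps).1 (innerLoopB p n ps).2 := by
  rw [outerLoopB, if_pos h]

theorem outerB_exit {p n : Int} (ps : List Int) (h : ¬ p * p ≤ n) :
    outerLoopB p n ps = (n, ps) := by
  rw [outerLoopB, if_neg h]

theorem inner16 : innerLoopB 2 16 [] = (1, [2, 2, 2, 2]) := by
  rw [innerB_step [] (by norm_num) (by norm_num) (by decide),
    show PySem.Int.floordiv 16 2 = 8 from by decide,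
    show ([] : List Int) ++ [2] = [2] from rfl]
  rw [innerB_step [2] (by norm_num) (by norm_num) (by decide),
    show PySem.Int.floordiv 8 2 = 4 from by decide,
    show ([2] : List Int) ++ [2] = [2, 2] from rfl]
  rw [innerB_step [2, 2] (by norm_num) (by norm_num) (by decide),
    show PySem.Int.floordiv 4 2 = 2 from by decide,
    show ([2, 2] : List Int) ++ [2] = [2, 2, 2] from rfl]
  rw [innerB_step [2, 2, 2] (by norm_num) (by norm_num) (by decide),
    show PySem.Int.floordiv 2 2 = 1 from by decide,
    show ([2, 2, 2] : List Int) ++ [2] = [2, 2, 2, 2] from rfl]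
  rw [innerB_exit [2, 2, 2, 2] (by decide)]

theorem outer16 : outerLoopB 2 16 [] = (1, [2, 2, 2, 2]) := by
  rw [outerB_step [] (by norm_num), inner16]
  show outerLoopB 3 1 [2, 2, 2, 2] = (1, [2, 2, 2, 2])
  rw [outerB_exit [2, 2, 2, 2] (by norm_num)]

theorem f_alt_16 : f_alt 16 = [2, 4, 8] := by
  unfold f_alt
  rw [if_neg (by norm_num : ¬ (16 : Int) < 4), outer16]
  decide

theorem f_16 : f 16 = [2, 4, 4, 8] := by
  have m2 : PySem.Int.mod 16 2 = 0 := by decide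
  have m3 : ¬ PySem.Int.mod 16 3 = 0 := by decide
  have m4 : PySem.Int.mod 16 4 = 0 := by decide
  have d5 : divs 16 5 = [] := by rw [divs]; norm_num
  have d4 : divs 16 4 = [4] := by rw [divs]; norm_num [m4, d5]
  have d3 : divs 16 3 = [4] := by rw [divs]; norm_num [m3, d4]
  have d2 : divs 16 2 = [2, 4] := by rw [divs]; norm_num [m2, d3]
  have hL : fLoopA 16 2 [] = [2, 8, 4, 4] := by
    rw [fLoopA_eq, d2]
    simp
  unfold f
  rw [hL]
  apply PySem.List.sorted_id_eq_of_perm_of_pairwise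
  · decide
  · decide

-- ===== VERDICT (by name: the statement is the Claim_ definition above) =====
theorem f_spec : Claim_unchanged_f := by
  intro x _ hD
  show f x = f_alt x
  by_cases hx : 4 ≤ x
  · exact main_eq hx (no_sqrt hx hD)
  · exact small_eq (by omega)

theorem f_changed : Claim_changed_f := by
  unfold Claim_changed_f
  refine ⟨by decide, ⟨by norm_num [pvDiffWitness_f], ?_⟩, f_16, f_alt_16, by decide⟩
  show Int.sqrt 16 * Int.sqrt 16 = 16
  rw [show (16 : Int) = 4 * 4 by norm_num, Int.sqrt_eq]
  rfl

theorem f_tight : Claim_exact_f := by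
  intro x _ hD heq
  obtain ⟨hx, hsq⟩ := hD
  have hs2 : 2 ≤ (Int.sqrt x : Int) := by
    by_contra h
    have h0 : 0 ≤ (Int.sqrt x : Int) := Int.sqrt_nonneg x
    have h1 : (Int.sqrt x : Int) ≤ 1 := by omega
    nlinarith
  have hcount := count_f_ge hsq hs2
  have hnd : (f_alt x).Nodup := f_alt_nodup hx
  rw [heq] at hcount
  have := List.nodup_iff_count_le_one.mp hnd (Int.sqrt x : Int)
  omega
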